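-- pv_equiv track=rewrite | github.com/Samosha123/Proga | PRZ5-6/prz5-6.py | kortrand
-- ===== SOURCE A (Python) =====
-- def kortrand(kortezh, searchNum):
--     kortNew = ()
--     check = False
--     for i in kortezh:
--         if (i == searchNum and check == False):
--             check = True
--             kortNew = kortNew+(i,)
--             continue
--         elif (i==searchNum and check == True):
--             kortNew = kortNew+(i,)
--             break
--
--         if (check == True):
--             kortNew = kortNew+(i,)
--     return kortNew
-- ===== SOURCE B (Python) =====
-- def kortrand(kortezh, searchNum):
--     items = tuple(kortezh)
--     try:
--         first = items.index(searchNum)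
--     except ValueError:
--         return ()
--     rest = items[first + 1:]
--     try:
--         j = rest.index(searchNum)
--     except ValueError:
--         return items[first:]
--     return items[first:first + j + 2]
-- ===== Notes on version B (the rewrite author's own statement) =====
-- stated objective: alternative
-- what changed: B locates the first and second occurrence indices with tuple.index and returns one slice, instead of A's single pass threading a check flag and concatenating the result tuple element by element.
import Mathlib
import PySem

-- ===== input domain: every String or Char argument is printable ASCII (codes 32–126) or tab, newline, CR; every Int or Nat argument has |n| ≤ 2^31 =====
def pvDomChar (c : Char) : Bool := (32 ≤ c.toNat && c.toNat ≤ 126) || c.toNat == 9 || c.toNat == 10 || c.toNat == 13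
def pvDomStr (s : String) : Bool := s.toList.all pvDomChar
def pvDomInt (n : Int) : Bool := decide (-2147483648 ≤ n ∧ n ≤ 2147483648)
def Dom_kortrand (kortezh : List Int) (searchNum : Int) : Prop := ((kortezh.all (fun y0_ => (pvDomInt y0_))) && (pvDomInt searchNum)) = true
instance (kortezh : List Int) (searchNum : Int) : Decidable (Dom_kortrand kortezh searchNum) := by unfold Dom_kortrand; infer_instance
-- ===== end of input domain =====

-- B finds the first/second occurrence indices and returns one slice, instead of A's flag-threaded accumulating pass (alternative decomposition, same behaviour).


-- ===== PORT A =====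
-- literal port of A's loop: state = (accumulated tuple, check flag); 'break' = return the accumulator
def kortrandLoop (searchNum : Int) (acc : List Int) (check : Bool) : List Int → List Int
  | [] => acc
  | i :: rest =>
    if i = searchNum ∧ check = false then
      kortrandLoop searchNum (acc ++ [i]) true rest
    else if i = searchNum ∧ check = true then
      acc ++ [i]
    else if check = true then
      kortrandLoop searchNum (acc ++ [i]) check rest
    else
      kortrandLoop searchNum acc check rest

def kortrand (kortezh : List Int) (searchNum : Int) : List Int :=
  kortrandLoop searchNum [] false kortezh

-- ===== PORT B =====
def kortrand_alt (kortezh : List Int) (searchNum : Int) : List Int :=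
  match PySem.List.index? kortezh searchNum with
  | none => []
  | some first =>
    let rest := PySem.List.slice kortezh (some ((first : Int) + 1)) none
    match PySem.List.index? rest searchNum with
    | none => PySem.List.slice kortezh (some (first : Int)) none
    | some j => PySem.List.slice kortezh (some (first : Int)) (some ((first : Int) + (j : Int) + 2))

-- ===== PRECONDITION & SPEC =====
def Spec_kortrand (kortezh : List Int) (searchNum : Int) (out : List Int) : Prop := out = kortrand_alt kortezh searchNum
instance (kortezh : List Int) (searchNum : Int) (out : List Int) : Decidable (Spec_kortrand kortezh searchNum out) := by unfold Spec_kortrand; infer_instance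

-- ===== CLAIM (what is proved, stated in full; the proofs are below) =====
def Claim_equal_kortrand : Prop := ∀ (kortezh : List Int) (searchNum : Int), Dom_kortrand kortezh searchNum → Spec_kortrand kortezh searchNum (kortrand kortezh searchNum)

-- ===== LEMMAS AND PROOFS =====

-- normalize B's slices to drop/take
theorem alt_char (xs : List Int) (s : Int) :
    kortrand_alt xs s =
      match PySem.List.index? xs s with
      | none => []
      | some f =>
        match PySem.List.index? (xs.drop (f + 1)) s with
        | none => xs.drop f
        | some j => (xs.drop f).take (j + 2)
      := by
  unfold kortrand_alt
  cases hf : PySem.List.index? xs s with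
  | none => rfl
  | some f =>
    have e1 : PySem.List.slice xs (some ((f : Int) + 1)) none = xs.drop (f + 1) := by
      have c : ((f : Int) + 1) = ((f + 1 : Nat) : Int) := by push_cast; ring
      rw [c, PySem.List.slice_from_natCast]
    have e2 : PySem.List.slice xs (some ((f : Int))) none = xs.drop f := by
      rw [PySem.List.slice_from_natCast]
    have e3 : ∀ j' : Nat, PySem.List.slice xs (some ((f : Int))) (some ((f : Int) + (j' : Int) + 2)) = (xs.drop f).take (j' + 2) := by
      intro j'
      have c : ((f : Int) + (j' : Int) + 2) = ((f + (j' + 2) : Nat) : Int) := by push_cast; ring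
      rw [c, PySem.List.slice_natCast]
      congr 1
      omega
    simp only [e1]
    cases hj : PySem.List.index? (xs.drop (f + 1)) s with
    | none => simpa using e2
    | some j => simpa using e3 j

-- phase 2 of A's loop (check = true): append everything up to and including the next occurrence
theorem kortrandLoop_true (s : Int) (acc : List Int) (xs : List Int) :
    kortrandLoop s acc true xs =
      acc ++ (match PySem.List.index? xs s with
              | none => xs
              | some j => xs.take (j + 1)) := by
  induction xs generalizing acc with
  | nil => simp [kortrandLoop, PySem.List.index?]
  | cons i rest ih =>
    by_cases h : i = s
    · subst h
      rw [PySem.List.index?_cons_self]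
      simp [kortrandLoop]
    · rw [PySem.List.index?_cons_of_ne (x := i) (v := s) (xs := rest) (fun hc => h hc)]
      simp only [kortrandLoop, h, false_and, if_false, and_true]
      rw [ih]
      cases hidx : PySem.List.index? rest s <;> simp

theorem kortrand_eq (xs : List Int) (s : Int) : kortrand xs s = kortrand_alt xs s := by
  rw [alt_char]
  induction xs with
  | nil => simp [kortrand, kortrandLoop, PySem.List.index?]
  | cons i rest ih =>
    by_cases h : i = s
    · subst h
      unfold kortrand
      rw [PySem.List.index?_cons_self]
      simp only [kortrandLoop, true_and, Bool.false_eq_true]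
      rw [kortrandLoop_true]
      simp only [List.drop_succ_cons, List.drop_zero]
      cases hidx : PySem.List.index? rest i with
      | none => simp
      | some j => simp [List.take_succ_cons]
    · have hA : kortrand (i :: rest) s = kortrand rest s := by
        unfold kortrand
        simp [kortrandLoop, h]
      rw [hA, ih]
      rw [PySem.List.index?_cons_of_ne (x := i) (v := s) (xs := rest) (fun hc => h hc)]
      cases hidx : PySem.List.index? rest s with
      | none => simp
      | some f =>
        simp only [Option.map_some, List.drop_succ_cons]

-- ===== VERDICT (by name: the statement is the Claim_ definition above) =====
theorem kortrand_spec : Claim_equal_kortrand := by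
  intro xs s _
  unfold Spec_kortrand
  rw [kortrand_eq]
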